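-- pv_equiv track=rewrite | github.com/deepthought42/Khala-Agentic-AI-Teams | backend/agents/nutrition_meal_planning_team/clinical_taxonomy.py | parse_medications
-- ===== SOURCE A (Python) =====
-- from enum import Enum
--
-- class Medication(str, Enum):
--     """Closed set of medication *classes* (not drug names).
--
--     Keyed by the interaction-relevant class so SPEC-007's guardrail can
--     look up forbidden ``InteractionTag`` sets deterministically.
--     """
--
--     warfarin = "warfarin"
--     maoi = "maoi"
--     ssri = "ssri"
--     acei_arb = "acei_arb"
--     k_sparing_diuretic = "k_sparing_diuretic"
--     statin = "statin"
--     amiodarone = "amiodarone"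
--     glp1 = "glp1"
--     metformin = "metformin"
--     levothyroxine = "levothyroxine"
--     lithium = "lithium"
--     st_johns_wort = "st_johns_wort"
--
-- def is_known_medication(value: str) -> bool:
--     """Return True iff ``value`` is a Medication enum value."""
--     return value in Medication._value2member_map_
--
-- def parse_medications(values: list[str]) -> tuple[list[Medication], list[str]]:
--     """Split a free list into (recognized medications, unrecognized strings)."""
--     known: list[Medication] = []
--     unknown: list[str] = []
--     seen: set[str] = set()
--     for raw in values:
--         s = (raw or "").strip()
--         if not s or s in seen:
--             continue
--         seen.add(s)
--         if is_known_medication(s):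
--             known.append(Medication(s))
--         else:
--             unknown.append(s)
--     return known, unknown
-- ===== SOURCE B (Python) =====
-- from enum import Enum
--
-- class Medication(str, Enum):
--     warfarin = "warfarin"
--     maoi = "maoi"
--     ssri = "ssri"
--     acei_arb = "acei_arb"
--     k_sparing_diuretic = "k_sparing_diuretic"
--     statin = "statin"
--     amiodarone = "amiodarone"
--     glp1 = "glp1"
--     metformin = "metformin"
--     levothyroxine = "levothyroxine"
--     lithium = "lithium"
--     st_johns_wort = "st_johns_wort"
--
-- def is_known_medication(value: str) -> bool:
--     return value in Medication._value2member_map_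
--
-- def parse_medications(values: list[str]) -> tuple[list[Medication], list[str]]:
--     """Normalize, dedup keeping first occurrence, then split by two filter passes."""
--     cleaned = [s for s in ((raw or "").strip() for raw in values) if s]
--     deduped = list(dict.fromkeys(cleaned))
--     known = [Medication(s) for s in deduped if is_known_medication(s)]
--     unknown = [s for s in deduped if not is_known_medication(s)]
--     return known, unknown
-- ===== Notes on version B (the rewrite author's own statement) =====
-- stated objective: simpler
-- what changed: A's single loop interleaving seen-set bookkeeping with classification is replaced by a pipeline: strip/drop-empty, order-preserving dedup via dict.fromkeys, then two independent filter passes for known and unknown.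
import Mathlib
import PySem

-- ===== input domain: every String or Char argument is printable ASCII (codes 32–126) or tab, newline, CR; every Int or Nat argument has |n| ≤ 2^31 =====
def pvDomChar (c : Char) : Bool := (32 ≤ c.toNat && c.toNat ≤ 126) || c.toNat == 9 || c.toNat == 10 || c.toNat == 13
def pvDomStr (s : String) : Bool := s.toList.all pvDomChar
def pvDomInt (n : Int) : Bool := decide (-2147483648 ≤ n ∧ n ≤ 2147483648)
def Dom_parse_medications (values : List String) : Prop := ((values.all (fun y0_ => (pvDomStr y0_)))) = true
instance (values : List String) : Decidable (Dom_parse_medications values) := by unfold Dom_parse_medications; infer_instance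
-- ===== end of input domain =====

-- B replaces A's single interleaved seen-set loop by normalize → ordered dedup → two filter passes (objective: simpler; same cost).
-- Medication enum members are ported as their str values.

-- ===== PORT A =====
-- Medication._value2member_map_ keys, in declaration order
def medicationValues : List String :=
  ["warfarin", "maoi", "ssri", "acei_arb", "k_sparing_diuretic", "statin",
   "amiodarone", "glp1", "metformin", "levothyroxine", "lithium", "st_johns_wort"]

def is_known_medication (value : String) : Bool := medicationValues.contains value

-- the loop of A: state (known, unknown, seen)
def parseMedsLoop : List String → List String → List String → PySem.Set String → List String × List String
  | [], known, unknown, _ => (known, unknown)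
  | raw :: rest, known, unknown, seen =>
      let s := PySem.Str.strip raw      -- (raw or "").strip() = raw.strip(): "or" only swaps "" for ""
      if s = "" ∨ PySem.Set.contains seen s then
        parseMedsLoop rest known unknown seen
      else
        let seen' := PySem.Set.add seen s
        if is_known_medication s then
          parseMedsLoop rest (known ++ [s]) unknown seen'
        else
          parseMedsLoop rest known (unknown ++ [s]) seen'

def parse_medications (values : List String) : List String × List String :=
  parseMedsLoop values [] [] PySem.Set.empty

-- ===== PORT B =====
def parse_medications_alt (values : List String) : List String × List String :=
  let cleaned := (values.map PySem.Str.strip).filter (fun s => s ≠ "")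
  let deduped := PySem.List.dedup cleaned    -- list(dict.fromkeys(cleaned))
  (deduped.filter (fun s => is_known_medication s),
   deduped.filter (fun s => ¬ is_known_medication s))

-- ===== PRECONDITION & SPEC =====
def Spec_parse_medications (values : List String) (out : List String × List String) : Prop := out = parse_medications_alt values
instance (values : List String) (out : List String × List String) : Decidable (Spec_parse_medications values out) := by unfold Spec_parse_medications; infer_instance

-- ===== CLAIM (what is proved, stated in full; the proofs are below) =====
def Claim_equal_parse_medications : Prop := ∀ (values : List String), Dom_parse_medications values → Spec_parse_medications values (parse_medications values)

-- ===== LEMMAS AND PROOFS =====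

-- the fresh-first-occurrence elements of cs relative to seen
def newElems : List String → PySem.Set String → List String
  | [], _ => []
  | s :: cs, seen =>
      if PySem.Set.contains seen s then newElems cs seen
      else s :: newElems cs (PySem.Set.add seen s)

lemma set_update_eq_append_newElems (cs : List String) (seen : PySem.Set String) :
    PySem.Set.update seen cs = seen ++ newElems cs seen := by
  induction cs generalizing seen with
  | nil => simp [newElems, PySem.Set.update]
  | cons s cs ih =>
      have hstep : PySem.Set.update seen (s :: cs) = PySem.Set.update (PySem.Set.add seen s) cs := rfl
      by_cases h : s ∈ seen
      · have hadd : PySem.Set.add seen s = seen := by simp [PySem.Set.add, h]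
        rw [hstep, hadd, ih]
        simp [newElems, h]
      · have hadd : PySem.Set.add seen s = seen ++ [s] := by simp [PySem.Set.add, h]
        rw [hstep, hadd, ih]
        simp [newElems, h, List.append_assoc]

lemma loop_eq (vs : List String) :
    ∀ (known unknown : List String) (seen : PySem.Set String),
    parseMedsLoop vs known unknown seen =
      (known ++ (newElems ((vs.map PySem.Str.strip).filter (fun s => s ≠ "")) seen).filter
          (fun s => is_known_medication s),
       unknown ++ (newElems ((vs.map PySem.Str.strip).filter (fun s => s ≠ "")) seen).filter
          (fun s => ¬ is_known_medication s)) := by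
  induction vs with
  | nil => intro known unknown seen; simp [parseMedsLoop, newElems]
  | cons raw rest ih =>
      intro known unknown seen
      by_cases hempty : PySem.Str.strip raw = ""
      · simp [parseMedsLoop, hempty, ih]
      · by_cases hseen : PySem.Str.strip raw ∈ seen
        · simp [parseMedsLoop, hempty, hseen, newElems, ih]
        · by_cases hk : is_known_medication (PySem.Str.strip raw) = true
          · simp [parseMedsLoop, hempty, hseen, newElems, hk, ih]
          · simp [parseMedsLoop, hempty, hseen, newElems, hk, ih]

lemma newElems_empty (cs : List String) :
    newElems cs PySem.Set.empty = PySem.List.dedup cs := by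
  have h := set_update_eq_append_newElems cs PySem.Set.empty
  have h2 : PySem.Set.update PySem.Set.empty cs = PySem.Set.ofList cs := rfl
  rw [h2] at h
  simpa [PySem.Set.empty, PySem.List.dedup_eq_ofList] using h.symm

-- ===== VERDICT (by name: the statement is the Claim_ definition above) =====
theorem parse_medications_spec : Claim_equal_parse_medications := by
  intro values _
  unfold Spec_parse_medications parse_medications parse_medications_alt
  rw [loop_eq, newElems_empty]
  simp
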